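-- pv_equiv track=rewrite | github.com/dgoffredo/hackerrank | determining-dna-health/naive-cached.py | min_and_max_scores
-- ===== SOURCE A (Python) =====
-- _num_occurrences_cache = {}
--
-- def num_occurrences(gene, strand):
--     end = len(strand) - len(gene) + 1
--     if end < 1:
--         return 0
--
--     key = gene, strand
--     cached_result = _num_occurrences_cache.get(key)
--     if cached_result is not None:
--         return cached_result
--     else:
--         count = sum(strand[i:].startswith(gene) for i in range(0, end))
--         _num_occurrences_cache[key] = count
--         return count
--
-- def min_and_max_scores(scored_genes, strands):
--     min_score = None
--     max_score = None
--
--     for first, last, strand in strands: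
--         genes = scored_genes[first:last + 1]
--         score = sum(weight * num_occurrences(gene, strand)
--                     for gene, weight in genes)
--
--         if min_score is None or score < min_score:
--             min_score = score
--         if max_score is None or score > max_score:
--             max_score = score
--
--     return min_score, max_score
-- ===== SOURCE B (Python) =====
-- def min_and_max_scores(scored_genes, strands):
--     scores = []
--     for first, last, strand in strands:
--         genes = scored_genes[first:last + 1]
--         weight_by_gene = {}
--         for gene, weight in genes:
--             weight_by_gene[gene] = weight_by_gene.get(gene, 0) + weight
--         lengths = {len(gene) for gene, _ in genes}
--         n = len(strand)
--         score = 0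
--         for i in range(n + 1):
--             for length in lengths:
--                 if i + length <= n:
--                     score += weight_by_gene.get(strand[i:i + length], 0)
--         scores.append(score)
--     if scores:
--         return min(scores), max(scores)
--     return None, None
-- ===== Notes on version B (the rewrite author's own statement) =====
-- stated objective: faster
-- what changed: Instead of scanning every position for every gene of the query slice (startswith per gene per position), B builds one weight dictionary and the set of distinct gene lengths per strand query and, in a single position-major pass, adds the hashed substring's aggregated weight for each distinct length; min/max are taken over the collected score list at the end.
import Mathlib
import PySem

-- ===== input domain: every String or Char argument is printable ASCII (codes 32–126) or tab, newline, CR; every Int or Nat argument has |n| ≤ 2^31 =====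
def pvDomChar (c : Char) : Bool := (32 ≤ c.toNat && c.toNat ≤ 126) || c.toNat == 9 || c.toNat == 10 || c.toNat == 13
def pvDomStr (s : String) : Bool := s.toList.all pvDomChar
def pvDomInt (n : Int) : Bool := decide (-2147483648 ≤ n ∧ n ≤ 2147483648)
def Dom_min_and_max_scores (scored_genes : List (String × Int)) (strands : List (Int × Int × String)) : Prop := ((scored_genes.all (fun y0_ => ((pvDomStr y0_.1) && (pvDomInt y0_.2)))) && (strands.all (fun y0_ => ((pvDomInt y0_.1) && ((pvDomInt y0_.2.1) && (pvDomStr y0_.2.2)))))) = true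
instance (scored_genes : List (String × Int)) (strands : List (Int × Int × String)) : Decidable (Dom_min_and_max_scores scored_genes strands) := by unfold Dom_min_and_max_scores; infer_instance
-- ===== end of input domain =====

-- B replaces A's gene-major startswith scanning with a per-strand weight dictionary looked up
-- at every position for each distinct gene length (return values only: A also fills a global
-- cache dict, a side effect B does not reproduce).

-- ===== PORT A =====
-- literal port of num_occurrences (the global cache does not affect return values)
def num_occurrences (gene : String) (strand : String) : Int :=
  let e : Int := PySem.Str.len strand - PySem.Str.len gene + 1
  if e < 1 then 0
  else ((PySem.List.pyRange 0 e).map (fun i =>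
    if PySem.Str.startswith (PySem.Str.slice strand (some i)) gene then (1 : Int) else 0)).sum

def min_and_max_scores (scored_genes : List (String × Int)) (strands : List (Int × Int × String)) : Option Int × Option Int :=
  strands.foldl (fun acc t =>
    let genes := PySem.List.slice scored_genes (some t.1) (some (t.2.1 + 1))
    let score := (genes.map (fun gw => gw.2 * num_occurrences gw.1 t.2.2)).sum
    let mn := match acc.1 with
      | none => some score
      | some m => if score < m then some score else some m
    let mx := match acc.2 with
      | none => some score
      | some m => if m < score then some score else some m
    (mn, mx)) (none, none)

-- ===== PORT B =====
def pvScoreStrand (genes : List (String × Int)) (strand : String) : Int :=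
  let d : PySem.Dict String Int :=
    genes.foldl (fun d gw => d.insert gw.1 (d.getD gw.1 0 + gw.2)) PySem.Dict.empty
  let lengths : PySem.Set Int := PySem.Set.ofList (genes.map (fun gw => PySem.Str.len gw.1))
  let n : Int := PySem.Str.len strand
  (PySem.List.pyRange 0 (n + 1)).foldl (fun score i =>
    lengths.foldl (fun score L =>
      if i + L ≤ n then score + d.getD (PySem.Str.slice strand (some i) (some (i + L))) 0
      else score) score) 0

def min_and_max_scores_alt (scored_genes : List (String × Int)) (strands : List (Int × Int × String)) : Option Int × Option Int :=
  let scores := strands.map (fun t =>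
    pvScoreStrand (PySem.List.slice scored_genes (some t.1) (some (t.2.1 + 1))) t.2.2)
  if scores.isEmpty then (none, none)
  else (PySem.List.min? scores (fun x => x), PySem.List.max? scores (fun x => x))

-- ===== PRECONDITION & SPEC =====
def Spec_min_and_max_scores (scored_genes : List (String × Int)) (strands : List (Int × Int × String)) (out : Option Int × Option Int) : Prop := out = min_and_max_scores_alt scored_genes strands
instance (scored_genes : List (String × Int)) (strands : List (Int × Int × String)) (out : Option Int × Option Int) : Decidable (Spec_min_and_max_scores scored_genes strands out) := by unfold Spec_min_and_max_scores; infer_instance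

-- ===== CLAIM (what is proved, stated in full; the proofs are below) =====
def Claim_equal_min_and_max_scores : Prop := ∀ (scored_genes : List (String × Int)) (strands : List (Int × Int × String)), Dom_min_and_max_scores scored_genes strands → Spec_min_and_max_scores scored_genes strands (min_and_max_scores scored_genes strands)

-- ===== LEMMAS AND PROOFS =====

-- canonical per-gene count of match positions in cs
def pvCnt (g : List Char) (cs : List Char) : Nat :=
  (List.range (cs.length + 1)).countP (fun i => PySem.Chars.startswith (cs.drop i) g)

-- total weight attached to key k among genes
def pvSumW (genes : List (String × Int)) (k : String) : Int :=
  (genes.map (fun gw => if gw.1 = k then gw.2 else 0)).sum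

lemma numOcc_eq_cnt (g s : String) :
    num_occurrences g s = (pvCnt g.toList s.toList : Int) := by
  unfold num_occurrences pvCnt
  set cs := s.toList with hcs
  set gs := g.toList with hgs
  set n := cs.length with hn
  set m := gs.length with hm
  by_cases h : (PySem.Str.len s - PySem.Str.len g + 1 < 1)
  · simp only [h, if_true]
    have hmn : n < m := by simp [PySem.Str.len_eq, ← hcs, ← hgs, ← hn, ← hm] at h; omega
    have : (List.range (n + 1)).countP (fun i => PySem.Chars.startswith (cs.drop i) gs) = 0 := by
      rw [List.countP_eq_zero]
      intro i _ hsw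
      have hp : gs <+: cs.drop i := (PySem.Chars.startswith_iff _ _).mp hsw
      have := hp.length_le
      simp [← hm] at this
      omega
    simp [this]
  · simp only [h, if_false]
    have hle : m ≤ n := by simp [PySem.Str.len_eq, ← hcs, ← hgs, ← hn, ← hm] at h; omega
    have he : PySem.Str.len s - PySem.Str.len g + 1 = ((n + 1 - m : Nat) : Int) := by
      simp [PySem.Str.len_eq, ← hcs, ← hgs, ← hn, ← hm]; omega
    rw [he, PySem.List.pyRange_zero_natCast, List.map_map]
    have hfun : ((fun i => if PySem.Str.startswith (PySem.Str.slice s (some i)) g then (1:Int) else 0) ∘ fun (k : Nat) => (k : Int))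
        = fun k : Nat => if PySem.Chars.startswith (cs.drop k) gs then (1:Int) else 0 := by
      funext k
      simp [PySem.Str.startswith_eq, PySem.Str.toList_slice, PySem.Chars.slice_eq_listSlice,
        PySem.List.slice_from_natCast, ← hcs, ← hgs]
    rw [hfun, PySem.List.sum_map_ite_one_zero]
    congr 1
    have hsplit : n + 1 = (n + 1 - m) + m := by omega
    conv_rhs => rw [hsplit]
    rw [List.range_add, List.countP_append]
    have : (List.countP (fun i => PySem.Chars.startswith (cs.drop i) gs) (List.map (fun k => n + 1 - m + k) (List.range m))) = 0 := by
      rw [List.countP_eq_zero]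
      intro i hi hsw
      simp only [List.mem_map, List.mem_range] at hi
      obtain ⟨k, hk, rfl⟩ := hi
      have hp : gs <+: cs.drop (n + 1 - m + k) := (PySem.Chars.startswith_iff _ _).mp hsw
      have := hp.length_le
      simp [← hm] at this
      omega
    omega

lemma dict_getD_step (genes : List (String × Int)) (d : PySem.Dict String Int) (k : String) :
    (genes.foldl (fun d gw => d.insert gw.1 (d.getD gw.1 0 + gw.2)) d).getD k 0
      = d.getD k 0 + pvSumW genes k := by
  induction genes generalizing d with
  | nil => simp [pvSumW]
  | cons gw rest ih =>
    simp only [List.foldl_cons, ih, pvSumW, List.map_cons, List.sum_cons]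
    rw [PySem.Dict.getD_insert]
    rcases eq_or_ne gw.1 k with hk | hk
    · simp [hk]; ring
    · simp [hk, Ne.symm hk]

lemma dict_getD_eq_sumW (genes : List (String × Int)) (k : String) :
    (genes.foldl (fun d gw => d.insert gw.1 (d.getD gw.1 0 + gw.2))
      (PySem.Dict.empty : PySem.Dict String Int)).getD k 0 = pvSumW genes k := by
  rw [dict_getD_step]
  simp [PySem.Dict.getD, PySem.Dict.get?_empty]
lemma pv_sum_swap {α β : Type} (l : List α) (m : List β) (f : α → β → Int) :
    (l.map (fun x => (m.map (fun y => f x y)).sum)).sum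
  = (m.map (fun y => (l.map (fun x => f x y)).sum)).sum := by
  induction l with
  | nil => simp
  | cons x xs ih => simp [ih]

lemma pv_sum_single {α : Type} [DecidableEq α] (l : List α) (h : α → Int) (a : α)
    (hnd : l.Nodup) (ha : a ∈ l) (h0 : ∀ x ∈ l, x ≠ a → h x = 0) :
    (l.map h).sum = h a := by
  induction l with
  | nil => cases ha
  | cons x xs ih =>
    simp only [List.map_cons, List.sum_cons]
    rcases List.mem_cons.mp ha with rfl | ha'
    · have : (xs.map h).sum = 0 := by
        apply List.sum_eq_zero
        intro y hy
        simp only [List.mem_map] at hy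
        obtain ⟨z, hz, rfl⟩ := hy
        exact h0 z (List.mem_cons_of_mem _ hz) (fun e => (List.nodup_cons.mp hnd).1 (e ▸ hz))
      simp [this]
    · rw [h0 x (List.mem_cons_self) (fun e => (List.nodup_cons.mp hnd).1 (e ▸ ha')),
        ih (List.nodup_cons.mp hnd).2 ha' (fun z hz => h0 z (List.mem_cons_of_mem _ hz))]
      ring

-- the crux: for a fixed position k ≤ n, summing dictionary weights over the distinct gene
-- lengths equals summing each gene's weight when it matches at k
lemma pv_row (genes : List (String × Int)) (s : String) (k : Nat) (hk : k ≤ s.toList.length) :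
    ((PySem.Set.ofList (genes.map (fun gw => PySem.Str.len gw.1)) : List Int).map
       (fun L => if (k:Int) + L ≤ (s.toList.length:Int)
          then pvSumW genes (PySem.Str.slice s (some (k:Int)) (some ((k:Int) + L))) else 0)).sum
  = (genes.map (fun gw => if PySem.Chars.startswith (s.toList.drop k) gw.1.toList then gw.2 else 0)).sum := by
  set cs := s.toList with hcs
  set n := cs.length with hn
  -- push the guard inside pvSumW's sum
  have hpush : ∀ (L : Int),
      (if (k:Int) + L ≤ (n:Int)
        then pvSumW genes (PySem.Str.slice s (some (k:Int)) (some ((k:Int) + L))) else 0)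
      = (genes.map (fun gw => if (k:Int) + L ≤ (n:Int) ∧ gw.1 = PySem.Str.slice s (some (k:Int)) (some ((k:Int) + L))
            then gw.2 else 0)).sum := by
    intro L
    unfold pvSumW
    split_ifs with hc
    · congr 1; apply List.map_congr_left; intro gw _; simp [hc]
    · symm; apply List.sum_eq_zero
      intro y hy
      simp only [List.mem_map] at hy
      obtain ⟨z, hz, rfl⟩ := hy
      simp [hc]
  simp only [hpush]
  rw [pv_sum_swap]
  congr 1
  apply List.map_congr_left
  intro gw hgw
  -- single nonzero term: L = len(gw.1)
  rw [pv_sum_single _ _ ((gw.1.toList.length : Int))]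
  · -- compute the remaining term
    have hslice : (PySem.Str.slice s (some (k:Int)) (some ((k:Int) + (gw.1.toList.length : Int)))).toList
        = List.take gw.1.toList.length (List.drop k cs) := by
      rw [PySem.Str.toList_slice, PySem.Chars.slice_eq_listSlice, PySem.List.slice_natCast_add]
    by_cases hsw : PySem.Chars.startswith (cs.drop k) gw.1.toList
    · have hp : gw.1.toList <+: cs.drop k := (PySem.Chars.startswith_iff _ _).mp hsw
      have htake : gw.1.toList = List.take gw.1.toList.length (List.drop k cs) :=
        List.prefix_iff_eq_take.mp hp
      have hlen : gw.1.toList.length ≤ n - k := by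
        have := hp.length_le
        simpa using this
      rw [if_pos, if_pos hsw]
      exact ⟨by omega, String.toList_inj.mp (by rw [hslice]; exact htake)⟩
    · rw [if_neg, if_neg hsw]
      rintro ⟨hle, heq⟩
      apply hsw
      rw [PySem.Chars.startswith_iff, List.prefix_iff_eq_take]
      have := congrArg String.toList heq
      rw [hslice] at this
      exact this
  · exact PySem.Set.nodup_ofList _
  · rw [PySem.Set.mem_ofList]
    exact List.mem_map.mpr ⟨gw, hgw, by simp [PySem.Str.len_eq]⟩
  · -- other lengths contribute 0
    intro L hL hne
    rw [PySem.Set.mem_ofList] at hL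
    obtain ⟨gw', _, rfl⟩ := List.mem_map.mp hL
    rw [if_neg]
    rintro ⟨hle, heq⟩
    apply hne
    have hslice' : (PySem.Str.slice s (some (k:Int)) (some ((k:Int) + PySem.Str.len gw'.1))).toList
        = List.take gw'.1.toList.length (List.drop k cs) := by
      rw [PySem.Str.len_eq, PySem.Str.toList_slice, PySem.Chars.slice_eq_listSlice,
        PySem.List.slice_natCast_add]
    have hlen' : (k:Int) + (gw'.1.toList.length : Int) ≤ (n : Int) := by
      simpa [PySem.Str.len_eq] using hle
    have : gw.1.toList.length = gw'.1.toList.length := by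
      have := congrArg (fun t => t.toList.length) heq
      simp only [hslice'] at this
      rw [this]
      rw [List.length_take, List.length_drop]
      omega
    simp [PySem.Str.len_eq, this]

lemma pv_foldl_guard_add {β : Type} (l : List β) (p : β → Prop) [DecidablePred p] (f : β → Int) (a : Int) :
    l.foldl (fun acc x => if p x then acc + f x else acc) a
      = a + (l.map (fun x => if p x then f x else 0)).sum := by
  rw [show (fun (acc : Int) x => if p x then acc + f x else acc)
        = (fun acc x => acc + if p x then f x else 0) from by
      funext acc x; split_ifs <;> simp, PySem.List.foldl_add]

lemma score_eq (genes : List (String × Int)) (s : String) :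
    (genes.map (fun gw => gw.2 * num_occurrences gw.1 s)).sum = pvScoreStrand genes s := by
  simp only [pvScoreStrand]
  simp only [pv_foldl_guard_add, PySem.List.foldl_add, dict_getD_eq_sumW]
  simp only [numOcc_eq_cnt, pvCnt, PySem.Str.len_eq]
  have hgw : ∀ (w : Int) (g : List Char),
      w * (((List.range (s.toList.length + 1)).countP
            (fun i => PySem.Chars.startswith (s.toList.drop i) g) : Nat) : Int)
      = ((List.range (s.toList.length + 1)).map
          (fun i => if PySem.Chars.startswith (s.toList.drop i) g then w else 0)).sum := by
    intro w g
    rw [← PySem.List.sum_map_ite_one_zero, ← List.sum_map_mul_left]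
    congr 1
    apply List.map_congr_left
    intro i _
    split_ifs <;> simp
  simp only [hgw]
  rw [pv_sum_swap]
  rw [show ((s.toList.length : Int) + 1) = ((s.toList.length + 1 : Nat) : Int) by push_cast; ring,
    PySem.List.pyRange_zero_natCast, List.map_map]
  rw [zero_add]
  congr 1
  apply List.map_congr_left
  intro k hk
  have hk' : k ≤ s.toList.length := by have := List.mem_range.mp hk; omega
  simpa using (pv_row genes s k hk').symm

lemma pv_pair_fold {T : Type} (F : T → Int) (l : List T) (a b : Option Int) :
    l.foldl (fun acc t =>
      ((match acc.1 with
        | none => some (F t)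
        | some m => if F t < m then some (F t) else some m),
       (match acc.2 with
        | none => some (F t)
        | some m => if m < F t then some (F t) else some m))) (a, b)
  = (l.foldl (fun m t => match m with
        | none => some (F t) | some mm => if F t < mm then some (F t) else some mm) a,
     l.foldl (fun m t => match m with
        | none => some (F t) | some mm => if mm < F t then some (F t) else some mm) b) := by
  induction l generalizing a b with
  | nil => rfl
  | cons x xs ih => simp only [List.foldl_cons, ih]

lemma pv_fold_min {T : Type} (G : T → Int) (l : List T) :
    List.foldl (fun m t => match m with
      | none => some (G t) | some mm => if G t < mm then some (G t) else some mm) none l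
  = PySem.List.min? (l.map G) (fun x => x) := by
  unfold PySem.List.min?
  rw [List.foldl_map]; congr 1; funext m t; cases m <;> rfl

lemma pv_fold_max {T : Type} (G : T → Int) (l : List T) :
    List.foldl (fun m t => match m with
      | none => some (G t) | some mm => if mm < G t then some (G t) else some mm) none l
  = PySem.List.max? (l.map G) (fun x => x) := by
  unfold PySem.List.max?
  rw [List.foldl_map]; congr 1; funext m t; cases m <;> rfl

lemma pv_minmax (sg : List (String × Int)) (strands : List (Int × Int × String)) :
    min_and_max_scores sg strands = min_and_max_scores_alt sg strands := by
  unfold min_and_max_scores min_and_max_scores_alt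
  simp only [score_eq]
  have hp := pv_pair_fold (fun t : Int × Int × String =>
    pvScoreStrand (PySem.List.slice sg (some t.1) (some (t.2.1 + 1))) t.2.2) strands none none
  rw [hp]
  cases strands with
  | nil => rfl
  | cons t ts =>
    rw [if_neg (by simp)]
    rw [← pv_fold_min, ← pv_fold_max]

-- ===== VERDICT (by name: the statement is the Claim_ definition above) =====
theorem min_and_max_scores_spec : Claim_equal_min_and_max_scores := by
  intro scored_genes strands _
  unfold Spec_min_and_max_scores
  exact pv_minmax scored_genes strands
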